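-- pv_equiv track=rewrite | github.com/mihaicrisan04/comp-programming | random/amazon/1.py | getMaximumCategoryMaxCount
-- ===== SOURCE A (Python) =====
-- def getMaximumCategoryMaxCount(categories):
--     # Write your code here
--     d = {}
--     m = {}
--     for c in categories:
--         if c not in d:
--             d[c] = 1
--         else:
--             d[c] += 1
--
--         max_c = -1
--         keys = []
--         for k, v in d.items():
--             if v > max_c:
--                 max_c = v
--                 keys = [k]
--             if v == max_c:
--                 keys.append(k)
--
--
--         keys = list(set(keys))
--
--         for key in keys:
--             if key not in m: m[key] = 1
--             else: m[key] += 1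
--
--     return max(m.values())
-- ===== SOURCE B (Python) =====
-- def getMaximumCategoryMaxCount(categories):
--     counts = {}
--     best = 0
--     leaders = []
--     awards = {}
--     ans = 0
--     for c in categories:
--         v = counts.get(c, 0) + 1
--         counts[c] = v
--         if v > best:
--             best = v
--             leaders = [c]
--         elif v == best:
--             leaders.append(c)
--         for k in leaders:
--             a = awards.get(k, 0) + 1
--             awards[k] = a
--             if a > ans:
--                 ans = a
--     return ans
-- ===== Notes on version B (the rewrite author's own statement) =====
-- stated objective: faster
-- what changed: A rescans every distinct category after each element to recompute the max count and its argmax set; B maintains the max count, the argmax list and a running answer incrementally, touching only the affected category plus the current argmax group per step.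
import Mathlib
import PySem

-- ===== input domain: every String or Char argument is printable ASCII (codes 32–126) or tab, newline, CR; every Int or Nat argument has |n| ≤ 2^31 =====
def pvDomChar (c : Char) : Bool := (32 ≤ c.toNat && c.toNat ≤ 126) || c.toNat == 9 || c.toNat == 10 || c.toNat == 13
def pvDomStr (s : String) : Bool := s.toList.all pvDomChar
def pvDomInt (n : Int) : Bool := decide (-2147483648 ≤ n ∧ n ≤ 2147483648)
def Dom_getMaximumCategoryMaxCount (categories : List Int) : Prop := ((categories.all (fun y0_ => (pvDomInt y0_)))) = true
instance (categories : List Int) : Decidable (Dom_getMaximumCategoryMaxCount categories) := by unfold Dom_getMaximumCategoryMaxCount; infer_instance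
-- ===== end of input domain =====

-- B replaces A's full rescan of all distinct categories at every step by incremental
-- maintenance of the current max count, its argmax set and a running answer (objective: faster).

-- ===== PORT A =====
-- 'if key not in dct: dct[key] = 1 else: dct[key] += 1' (used twice verbatim in A, for d and for m)
def pvDictBump (d : PySem.Dict Int Int) (c : Int) : PySem.Dict Int Int :=
  if ¬ d.contains c then d.insert c 1 else d.modify c 0 (· + 1)

-- body of A's inner 'for k, v in d.items():' loop
def aScanStep (s : Int × List Int) (kv : Int × Int) : Int × List Int :=
  let s := if kv.2 > s.1 then (kv.2, [kv.1]) else s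
  if kv.2 == s.1 then (s.1, s.2 ++ [kv.1]) else s

-- body of A's outer 'for c in categories:' loop; state = (d, m)
def aStep (st : PySem.Dict Int Int × PySem.Dict Int Int) (c : Int) :
    PySem.Dict Int Int × PySem.Dict Int Int :=
  let d := pvDictBump st.1 c
  let s := d.items.foldl aScanStep (-1, [])
  let keys : List Int := PySem.Set.ofList s.2            -- keys = list(set(keys))
  (d, keys.foldl pvDictBump st.2)

-- 'max(m.values())' raises ValueError on an empty m (empty categories): excluded by Pre_
def getMaximumCategoryMaxCount (categories : List Int) : Int :=
  let st := categories.foldl aStep (PySem.Dict.empty, PySem.Dict.empty)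
  (PySem.List.max? st.2.values (fun x => x)).getD 0

-- ===== PORT B =====
-- body of B's 'for k in leaders:' loop; state = (awards, ans)
def bAward (q : PySem.Dict Int Int × Int) (k : Int) : PySem.Dict Int Int × Int :=
  let a := q.1.getD k 0 + 1
  (q.1.insert k a, if a > q.2 then a else q.2)

-- body of B's 'for c in categories:' loop; state = (counts, best, leaders, awards, ans)
def bStep (st : PySem.Dict Int Int × Int × List Int × PySem.Dict Int Int × Int) (c : Int) :
    PySem.Dict Int Int × Int × List Int × PySem.Dict Int Int × Int :=
  let v := st.1.getD c 0 + 1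
  let counts := st.1.insert c v
  let bl := if v > st.2.1 then (v, [c])
            else if v == st.2.1 then (st.2.1, st.2.2.1 ++ [c])
            else (st.2.1, st.2.2.1)
  let aa := bl.2.foldl bAward (st.2.2.2.1, st.2.2.2.2)
  (counts, bl.1, bl.2, aa.1, aa.2)

def getMaximumCategoryMaxCount_alt (categories : List Int) : Int :=
  let st := categories.foldl bStep (PySem.Dict.empty, 0, [], PySem.Dict.empty, 0)
  st.2.2.2.2

-- ===== PRECONDITION & SPEC =====
-- Python A raises ValueError ('max() arg is an empty sequence') on an empty list: excluded.
def Pre_getMaximumCategoryMaxCount (categories : List Int) : Prop := categories ≠ []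
instance (categories : List Int) : Decidable (Pre_getMaximumCategoryMaxCount categories) := by
  unfold Pre_getMaximumCategoryMaxCount; infer_instance
def pvWitness_getMaximumCategoryMaxCount : List Int := [1, 2, 1]

def Spec_getMaximumCategoryMaxCount (categories : List Int) (out : Int) : Prop := out = getMaximumCategoryMaxCount_alt categories
instance (categories : List Int) (out : Int) : Decidable (Spec_getMaximumCategoryMaxCount categories out) := by unfold Spec_getMaximumCategoryMaxCount; infer_instance

-- ===== CLAIM (what is proved, stated in full; the proofs are below) =====
def Claim_equal_getMaximumCategoryMaxCount : Prop := ∀ (categories : List Int), Dom_getMaximumCategoryMaxCount categories → Pre_getMaximumCategoryMaxCount categories → Spec_getMaximumCategoryMaxCount categories (getMaximumCategoryMaxCount categories)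

-- ===== LEMMAS AND PROOFS =====

-- abbreviations for the proof: occurrence count, distinct keys, max count, argmax set
def pvCnt (p : List Int) (k : Int) : Int := (p.count k : Int)
def pvKeys (p : List Int) : List Int := PySem.Set.ofList p
def pvMx (p : List Int) : Int := ((pvKeys p).map (pvCnt p)).foldl max (-1)
def pvArg (p : List Int) (k : Int) : Prop := k ∈ pvKeys p ∧ pvCnt p k = pvMx p
-- running max of a dict's values, anchored at 0
def pvVK (d : PySem.Dict Int Int) : Int := (d.keys.map (fun k => d.getD k 0)).foldl max 0

lemma modify_eq_insert_getD (d : PySem.Dict Int Int) (c : Int) :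
    d.modify c 0 (· + 1) = d.insert c (d.getD c 0 + 1) := rfl

lemma pvDictBump_eq (d : PySem.Dict Int Int) (c : Int) :
    pvDictBump d c = d.insert c (d.getD c 0 + 1) := by
  unfold pvDictBump
  by_cases h : d.contains c
  · simp [h]; rfl
  · have h' : d.contains c = false := by simpa using h
    rw [PySem.Dict.getD_of_not_contains d 0 h']
    simp [h']

lemma counter_step (p : List Int) (c : Int) :
    (PySem.Dict.counter p).insert c ((PySem.Dict.counter p).getD c 0 + 1)
      = PySem.Dict.counter (p ++ [c]) := by
  rw [PySem.Dict.counter_append_singleton, modify_eq_insert_getD]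

lemma foldl_max_unique {L : List Int} {init z : Int} (hz : z ∈ L ∨ z = init)
    (hub : ∀ x ∈ L, x ≤ z) (hinit : init ≤ z) : L.foldl max init = z := by
  have h1 := PySem.List.le_foldl_max L init
  refine le_antisymm ?_ ?_
  · rcases PySem.List.foldl_max_mem L init with h2 | h2
    · rw [h2]; exact hinit
    · exact hub _ h2
  · rcases hz with hz | hz
    · exact h1.2 z hz
    · rw [hz]; exact h1.1

lemma scan_spec (l : List (Int × Int)) (mc : Int) (ks : List Int) :
    (l.foldl aScanStep (mc, ks)).1 = l.foldl (fun a kv => max a kv.2) mc ∧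
    ∀ k, k ∈ (l.foldl aScanStep (mc, ks)).2 ↔
      ((k ∈ ks ∧ l.foldl (fun a kv => max a kv.2) mc = mc) ∨
       ∃ v, (k, v) ∈ l ∧ v = l.foldl (fun a kv => max a kv.2) mc) := by
  induction l generalizing mc ks with
  | nil => simp
  | cons kv t ih =>
    obtain ⟨k0, v0⟩ := kv
    have hF := PySem.List.le_foldl_max_int t (fun kv => (kv.2 : Int)) (max mc v0)
    set F := t.foldl (fun a kv => max a kv.2) (max mc v0) with hFdef
    have hcons : ((k0, v0) :: t).foldl (fun a kv => max a kv.2) mc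
        = t.foldl (fun a kv => max a kv.2) (max mc v0) := by simp
    rcases lt_trichotomy mc v0 with hlt | heq | hgt
    · -- v0 > mc: state becomes (v0, [k0, k0])
      have hstep : aScanStep (mc, ks) (k0, v0) = (v0, [k0, k0]) := by
        unfold aScanStep
        simp [hlt]
      have hmax : max mc v0 = v0 := max_eq_right (le_of_lt hlt)
      constructor
      · simp only [List.foldl_cons, hstep, (ih v0 [k0, k0]).1, hcons, hmax]
      · intro k
        rw [List.foldl_cons, hstep, (ih v0 [k0, k0]).2 k, hcons]
        rw [hmax] at hFdef hF ⊢
        constructor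
        · rintro (⟨hk, hFv⟩ | ⟨v, hv, hveq⟩)
          · simp at hk
            exact Or.inr ⟨v0, by simp [hk], by omega⟩
          · exact Or.inr ⟨v, List.mem_cons_of_mem _ hv, hveq⟩
        · rintro (⟨hk, hFv⟩ | ⟨v, hv, hveq⟩)
          · -- F = mc impossible: F ≥ v0 > mc
            exfalso; omega
          · rcases List.mem_cons.mp hv with hv | hv
            · obtain ⟨h1, h2⟩ := Prod.mk.inj hv
              exact Or.inl ⟨by simp [h1], by omega⟩
            · exact Or.inr ⟨v, hv, hveq⟩
    · -- v0 = mc: state becomes (mc, ks ++ [k0])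
      have hstep : aScanStep (mc, ks) (k0, v0) = (mc, ks ++ [k0]) := by
        unfold aScanStep
        simp [heq]
      have hmax : max mc v0 = mc := by omega
      constructor
      · simp only [List.foldl_cons, hstep, (ih mc (ks ++ [k0])).1, hcons, hmax]
      · intro k
        rw [List.foldl_cons, hstep, (ih mc (ks ++ [k0])).2 k, hcons]
        rw [hmax] at hFdef hF ⊢
        constructor
        · rintro (⟨hk, hFv⟩ | ⟨v, hv, hveq⟩)
          · rcases List.mem_append.mp hk with hk | hk
            · exact Or.inl ⟨hk, hFv⟩
            · simp at hk
              exact Or.inr ⟨v0, by simp [hk], by omega⟩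
          · exact Or.inr ⟨v, List.mem_cons_of_mem _ hv, hveq⟩
        · rintro (⟨hk, hFv⟩ | ⟨v, hv, hveq⟩)
          · exact Or.inl ⟨List.mem_append.mpr (Or.inl hk), hFv⟩
          · rcases List.mem_cons.mp hv with hv | hv
            · obtain ⟨h1, h2⟩ := Prod.mk.inj hv
              exact Or.inl ⟨by simp [h1], by omega⟩
            · exact Or.inr ⟨v, hv, hveq⟩
    · -- v0 < mc: state unchanged
      have hstep : aScanStep (mc, ks) (k0, v0) = (mc, ks) := by
        unfold aScanStep
        simp [not_lt.mpr (le_of_lt hgt), (show ¬ v0 = mc by omega)]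
      have hmax : max mc v0 = mc := max_eq_left (le_of_lt hgt)
      constructor
      · simp only [List.foldl_cons, hstep, (ih mc ks).1, hcons, hmax]
      · intro k
        rw [List.foldl_cons, hstep, (ih mc ks).2 k, hcons]
        rw [hmax] at hFdef hF ⊢
        constructor
        · rintro (⟨hk, hFv⟩ | ⟨v, hv, hveq⟩)
          · exact Or.inl ⟨hk, hFv⟩
          · exact Or.inr ⟨v, List.mem_cons_of_mem _ hv, hveq⟩
        · rintro (⟨hk, hFv⟩ | ⟨v, hv, hveq⟩)
          · exact Or.inl ⟨hk, hFv⟩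
          · rcases List.mem_cons.mp hv with hv | hv
            · obtain ⟨h1, h2⟩ := Prod.mk.inj hv
              -- v = v0 < mc ≤ F = v: contradiction
              exfalso
              have := hF.1
              omega
            · exact Or.inr ⟨v, hv, hveq⟩

lemma cnt_nonneg (p : List Int) (k : Int) : 0 ≤ pvCnt p k := by
  simp [pvCnt]

lemma mem_pvKeys (p : List Int) (k : Int) : k ∈ pvKeys p ↔ k ∈ p := by
  exact PySem.Set.mem_ofList p k

lemma cnt_pos_of_mem {p : List Int} {k : Int} (h : k ∈ pvKeys p) : 1 ≤ pvCnt p k := by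
  have := (mem_pvKeys p k).mp h
  have := List.count_pos_iff.mpr this
  unfold pvCnt; omega

lemma cnt_le_Mx {p : List Int} {k : Int} (h : k ∈ pvKeys p) : pvCnt p k ≤ pvMx p := by
  have hm : pvCnt p k ∈ (pvKeys p).map (pvCnt p) := List.mem_map_of_mem h
  exact (PySem.List.le_foldl_max _ (-1)).2 _ hm

lemma Mx_attained {p : List Int} (h : p ≠ []) : ∃ k ∈ pvKeys p, pvCnt p k = pvMx p := by
  rcases PySem.List.foldl_max_mem ((pvKeys p).map (pvCnt p)) (-1) with h2 | h2
  · obtain ⟨k, hk⟩ := List.exists_mem_of_ne_nil p h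
    have hk' : k ∈ pvKeys p := (mem_pvKeys p k).mpr hk
    have := cnt_pos_of_mem hk'
    have := cnt_le_Mx hk'
    unfold pvMx at *; omega
  · obtain ⟨k, hk, hk2⟩ := List.mem_map.mp h2
    exact ⟨k, hk, hk2⟩

lemma cnt_append (p : List Int) (c k : Int) :
    pvCnt (p ++ [c]) k = pvCnt p k + (if k = c then 1 else 0) := by
  unfold pvCnt
  rw [List.count_append]
  by_cases h : k = c
  · simp [h]
  · have h' : ¬ c = k := fun hh => h hh.symm
    simp [h, h']

lemma mem_pvKeys_append (p : List Int) (c k : Int) :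
    k ∈ pvKeys (p ++ [c]) ↔ k ∈ pvKeys p ∨ k = c := by
  simp [mem_pvKeys]

lemma Mx_append (p : List Int) (c : Int) :
    pvMx (p ++ [c]) = max (pvMx p) (pvCnt p c + 1) := by
  have hcc : pvCnt (p ++ [c]) c = pvCnt p c + 1 := by rw [cnt_append]; simp
  apply foldl_max_unique
  · left
    rcases le_or_gt (pvMx p) (pvCnt p c + 1) with hle | hlt
    · have : max (pvMx p) (pvCnt p c + 1) = pvCnt p c + 1 := max_eq_right hle
      rw [this, ← hcc]
      exact List.mem_map_of_mem ((mem_pvKeys_append p c c).mpr (Or.inr rfl))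
    · have hmx : max (pvMx p) (pvCnt p c + 1) = pvMx p := max_eq_left (le_of_lt hlt)
      rw [hmx]
      have hne : p ≠ [] := by
        intro h; subst h
        have : pvCnt ([] : List Int) c = 0 := by simp [pvCnt]
        have : pvMx ([] : List Int) = -1 := by simp [pvMx, pvKeys, PySem.Set.ofList]
        omega
      obtain ⟨k0, hk0, hk0c⟩ := Mx_attained hne
      have hkne : k0 ≠ c := by
        intro h
        rw [h] at hk0c
        omega
      have : pvCnt (p ++ [c]) k0 = pvMx p := by rw [cnt_append]; simp [hkne, hk0c]
      rw [← this]
      exact List.mem_map_of_mem ((mem_pvKeys_append p c k0).mpr (Or.inl hk0))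
  · intro x hx
    obtain ⟨k, hk, hkx⟩ := List.mem_map.mp hx
    rcases (mem_pvKeys_append p c k).mp hk with hk' | hk'
    · by_cases hkc : k = c
      · subst hkc
        have := cnt_le_Mx hk'
        rw [← hkx, cnt_append]
        omega
      · rw [← hkx, cnt_append]
        have := cnt_le_Mx hk'
        simp [hkc]; omega
    · subst hk'
      rw [← hkx, hcc]; omega
  · have h0 : 0 ≤ pvCnt p c := cnt_nonneg p c
    have := le_max_right (pvMx p) (pvCnt p c + 1)
    omega

lemma pvVK_nonneg (d : PySem.Dict Int Int) : 0 ≤ pvVK d := by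
  exact (PySem.List.le_foldl_max _ 0).1

lemma mem_keys_insert' (d : PySem.Dict Int Int) (k v j : Int) :
    j ∈ (d.insert k v).keys ↔ j ∈ d.keys ∨ j = k := by
  rw [PySem.Dict.mem_keys_insert]; tauto

lemma pvVK_insert (d : PySem.Dict Int Int) (k : Int) :
    pvVK (d.insert k (d.getD k 0 + 1)) = max (pvVK d) (d.getD k 0 + 1) := by
  set a := d.getD k 0 + 1 with ha
  set d' := d.insert k a with hd'
  have hget : ∀ j, d'.getD j 0 = if j = k then a else d.getD j 0 := fun j =>
    PySem.Dict.getD_insert d k j a 0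
  apply foldl_max_unique
  · rcases le_or_gt (pvVK d) a with hle | hlt
    · left
      rw [max_eq_right hle]
      have hk : k ∈ d'.keys := (mem_keys_insert' d k a k).mpr (Or.inr rfl)
      have : a = d'.getD k 0 := by rw [hget k]; simp
      rw [this]
      exact List.mem_map_of_mem hk
    · rw [max_eq_left (le_of_lt hlt)]
      rcases PySem.List.foldl_max_mem (d.keys.map (fun j => d.getD j 0)) 0 with h2 | h2
      · right
        unfold pvVK
        exact h2
      · left
        obtain ⟨j, hj, hjv⟩ := List.mem_map.mp h2
        have hjk : j ≠ k := by
          intro h; rw [h] at hjv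
          unfold pvVK at hlt; omega
        have : d'.getD j 0 = pvVK d := by rw [hget j]; simp [hjk]; exact hjv
        rw [← this]
        exact List.mem_map_of_mem ((mem_keys_insert' d k a j).mpr (Or.inl hj))
  · intro x hx
    obtain ⟨j, hj, hjv⟩ := List.mem_map.mp hx
    rcases (mem_keys_insert' d k a j).mp hj with hj' | hj'
    · by_cases hjk : j = k
      · subst hjk
        rw [hget j] at hjv; simp at hjv
        omega
      · rw [hget j] at hjv; simp [hjk] at hjv
        have hmm : d.getD j 0 ∈ d.keys.map (fun j => d.getD j 0) := List.mem_map_of_mem hj'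
        have hle := (PySem.List.le_foldl_max (d.keys.map (fun j => d.getD j 0)) 0).2 _ hmm
        rw [hjv] at hle
        exact le_trans hle (le_max_left _ _)
    · subst hj'
      rw [hget j] at hjv; simp at hjv
      omega
  · have := pvVK_nonneg d
    have := le_max_left (pvVK d) a
    omega

lemma pvVK_le (d e : PySem.Dict Int Int) (hmem : ∀ k, k ∈ d.keys → k ∈ e.keys)
    (hg : ∀ k, d.getD k 0 = e.getD k 0) : pvVK d ≤ pvVK e := by
  rcases PySem.List.foldl_max_mem (d.keys.map (fun j => d.getD j 0)) 0 with h2 | h2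
  · unfold pvVK; rw [h2]; exact pvVK_nonneg e
  · obtain ⟨j, hj, hjv⟩ := List.mem_map.mp h2
    have hje : j ∈ e.keys := hmem j hj
    have : e.getD j 0 ∈ e.keys.map (fun j => e.getD j 0) := List.mem_map_of_mem hje
    have hle := (PySem.List.le_foldl_max (e.keys.map (fun j => e.getD j 0)) 0).2 _ this
    unfold pvVK
    rw [← hjv, hg j]
    exact hle

lemma pvVK_ext (d e : PySem.Dict Int Int) (hmem : ∀ k, k ∈ d.keys ↔ k ∈ e.keys)
    (hg : ∀ k, d.getD k 0 = e.getD k 0) : pvVK d = pvVK e := by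
  exact le_antisymm (pvVK_le d e (fun k h => (hmem k).mp h) hg)
    (pvVK_le e d (fun k h => (hmem k).mpr h) (fun k => (hg k).symm))

lemma mem_set_update (s : PySem.Set Int) (l : List Int) (k : Int) :
    k ∈ PySem.Set.update s l ↔ k ∈ s ∨ k ∈ l := by
  induction l generalizing s with
  | nil => simp [PySem.Set.update]
  | cons x t ih =>
    have hstep : PySem.Set.update s (x :: t) = PySem.Set.update (PySem.Set.add s x) t := rfl
    rw [hstep, ih, PySem.Set.mem_add]
    simp
    tauto

lemma bAward_fold (ks : List Int) (aw : PySem.Dict Int Int) (ans : Int) (h : ans = pvVK aw) :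
    ks.foldl bAward (aw, ans) =
      (ks.foldl (fun d k => d.insert k (d.getD k 0 + 1)) aw,
       pvVK (ks.foldl (fun d k => d.insert k (d.getD k 0 + 1)) aw)) := by
  induction ks generalizing aw ans with
  | nil => simp [h]
  | cons k t ih =>
    simp only [List.foldl_cons]
    have hstep : bAward (aw, ans) k
        = (aw.insert k (aw.getD k 0 + 1), pvVK (aw.insert k (aw.getD k 0 + 1))) := by
      unfold bAward
      simp only [h, pvVK_insert]
      congr 1
      rcases le_or_gt (aw.getD k 0 + 1) (pvVK aw) with hle | hlt
      · simp [max_eq_left hle]; omega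
      · simp [max_eq_right (le_of_lt hlt)]; omega
    rw [hstep]
    exact ih _ _ rfl

-- the joint invariant carried over the two folds
def pvInv (p : List Int) (stA : PySem.Dict Int Int × PySem.Dict Int Int)
    (stB : PySem.Dict Int Int × Int × List Int × PySem.Dict Int Int × Int) : Prop :=
  stA.1 = PySem.Dict.counter p ∧
  stB.1 = PySem.Dict.counter p ∧
  stB.2.1 = max (pvMx p) 0 ∧
  (∀ k, k ∈ stB.2.2.1 ↔ pvArg p k) ∧
  stB.2.2.1.Nodup ∧
  (∀ k, stA.2.getD k 0 = stB.2.2.2.1.getD k 0) ∧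
  (∀ k, k ∈ stA.2.keys ↔ k ∈ stB.2.2.2.1.keys) ∧
  stA.2.keys.Nodup ∧ stB.2.2.2.1.keys.Nodup ∧
  stB.2.2.2.2 = pvVK stB.2.2.2.1 ∧
  (∀ k, 0 ≤ stA.2.getD k 0) ∧
  (p ≠ [] → stA.2.keys ≠ [])

lemma getD_counter' (p : List Int) (c : Int) :
    (PySem.Dict.counter p).getD c 0 = pvCnt p c := by
  unfold pvCnt; exact PySem.Dict.getD_counter p c

lemma count_eq_one_of_nodup_mem {l : List Int} {k : Int} (hnd : l.Nodup) (hk : k ∈ l) :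
    l.count k = 1 := by
  have h1 := List.nodup_iff_count_le_one.mp hnd k
  have h2 := List.count_pos_iff.mpr hk
  omega

lemma pvInv_step (p : List Int) (c : Int) (stA) (stB) (h : pvInv p stA stB) :
    pvInv (p ++ [c]) (aStep stA c) (bStep stB c) := by
  obtain ⟨dA, mA⟩ := stA
  obtain ⟨counts, best, leaders, awards, ans⟩ := stB
  obtain ⟨h1, h2, h3, h4, h5, h6, h7, h8, h9, h10, h11, h12⟩ := h
  simp only at h1 h2 h3 h4 h5 h6 h7 h8 h9 h10 h11 h12
  have hVpos : 1 ≤ pvCnt p c + 1 := by have := cnt_nonneg p c; omega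
  have hMx' : pvMx (p ++ [c]) = max (pvMx p) (pvCnt p c + 1) := Mx_append p c
  have hmaxfacts := max_choice (pvMx p) (0 : Int)
  have hmf1 : pvMx p ≤ max (pvMx p) 0 := le_max_left _ _
  have hmf2 : (0 : Int) ≤ max (pvMx p) 0 := le_max_right _ _
  have hmx'1 : pvMx p ≤ pvMx (p ++ [c]) := by rw [hMx']; exact le_max_left _ _
  have hmx'2 : pvCnt p c + 1 ≤ pvMx (p ++ [c]) := by rw [hMx']; exact le_max_right _ _
  -- A's dict update
  have hd : pvDictBump dA c = PySem.Dict.counter (p ++ [c]) := by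
    rw [pvDictBump_eq, h1, counter_step]
  -- B's dict update and the new count v
  have hveq : counts.getD c 0 + 1 = pvCnt p c + 1 := by rw [h2, getD_counter']
  have hcounts : counts.insert c (counts.getD c 0 + 1) = PySem.Dict.counter (p ++ [c]) := by
    rw [h2, getD_counter', ← counter_step, getD_counter']
  -- A's scan over the items of the new dict
  have hscan := scan_spec (PySem.Dict.counter (p ++ [c])).items (-1) []
  have hM : (PySem.Dict.counter (p ++ [c])).items.foldl (fun a kv => max a kv.2) (-1)
      = pvMx (p ++ [c]) := by
    rw [PySem.Dict.items_counter, List.foldl_map]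
    unfold pvMx pvKeys pvCnt
    rw [List.foldl_map]
  have hksraw : ∀ k, k ∈ ((PySem.Dict.counter (p ++ [c])).items.foldl aScanStep (-1, [])).2
      ↔ pvArg (p ++ [c]) k := by
    intro k
    rw [hscan.2 k, hM]
    constructor
    · rintro (⟨hk, _⟩ | ⟨w, hw, hweq⟩)
      · simp at hk
      · rw [PySem.Dict.items_counter] at hw
        obtain ⟨j, hj, hjeq⟩ := List.mem_map.mp hw
        obtain ⟨hjk, hjw⟩ := Prod.mk.inj hjeq
        refine ⟨hjk ▸ hj, ?_⟩
        unfold pvCnt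
        rw [← hjk, hjw, hweq]
    · rintro ⟨hk, hcnt⟩
      refine Or.inr ⟨pvCnt (p ++ [c]) k, ?_, hcnt⟩
      rw [PySem.Dict.items_counter]
      exact List.mem_map.mpr ⟨k, hk, rfl⟩
  set ksD : List Int :=
    PySem.Set.ofList ((PySem.Dict.counter (p ++ [c])).items.foldl aScanStep (-1, [])).2 with hksD
  have hmemD : ∀ k, k ∈ ksD ↔ pvArg (p ++ [c]) k := by
    intro k
    rw [hksD, PySem.Set.mem_ofList]
    exact hksraw k
  have hnodD : ksD.Nodup := PySem.Set.nodup_ofList _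
  -- the branch: new (best, leaders) pair
  set BL : Int × List Int :=
    (if counts.getD c 0 + 1 > best then (counts.getD c 0 + 1, [c])
     else if (counts.getD c 0 + 1) == best then (best, leaders ++ [c])
     else (best, leaders)) with hBL
  have hbl : BL.1 = max (pvMx (p ++ [c])) 0 ∧ (∀ k, k ∈ BL.2 ↔ pvArg (p ++ [c]) k)
      ∧ BL.2.Nodup := by
    rw [hBL, hveq, h3]
    by_cases hgt : pvCnt p c + 1 > max (pvMx p) 0
    · have hmxv : pvMx (p ++ [c]) = pvCnt p c + 1 := by
        rcases max_choice (pvMx p) (pvCnt p c + 1) with hh | hh <;> omega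
      rw [if_pos hgt]
      refine ⟨?_, ?_, by simp⟩
      · show pvCnt p c + 1 = max (pvMx (p ++ [c])) 0
        rw [max_eq_left (by omega : (0 : Int) ≤ pvMx (p ++ [c]))]
        omega
      · intro k
        simp only [List.mem_singleton]
        constructor
        · intro hk
          rw [hk]
          refine ⟨(mem_pvKeys_append p c c).mpr (Or.inr rfl), ?_⟩
          rw [cnt_append, hmxv]
          simp
        · rintro ⟨hk, hcnt⟩
          by_contra hkc
          rw [cnt_append] at hcnt
          simp [hkc] at hcnt
          have hkp : k ∈ pvKeys p := by
            rcases (mem_pvKeys_append p c k).mp hk with h' | h'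
            · exact h'
            · exact absurd h' hkc
          have := cnt_le_Mx hkp
          omega
    · by_cases heq2 : pvCnt p c + 1 = max (pvMx p) 0
      · have hmaxp : max (pvMx p) 0 = pvMx p := by
          rcases hmaxfacts with hc | hc
          · exact hc
          · omega
        have hmxp2 : pvMx p = pvCnt p c + 1 := by omega
        have hmxv : pvMx (p ++ [c]) = pvMx p := by
          rcases max_choice (pvMx p) (pvCnt p c + 1) with hh | hh <;> omega
        rw [if_neg hgt, if_pos (beq_iff_eq.mpr heq2)]
        refine ⟨?_, ?_, ?_⟩
        · show max (pvMx p) 0 = max (pvMx (p ++ [c])) 0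
          rw [hmxv]
        · intro k
          rw [List.mem_append, List.mem_singleton]
          by_cases hkc : k = c
          · rw [hkc]
            simp only [or_true, true_iff]
            refine ⟨(mem_pvKeys_append p c c).mpr (Or.inr rfl), ?_⟩
            rw [cnt_append, hmxv]
            simp
            omega
          · simp only [hkc, or_false]
            rw [h4 k]
            unfold pvArg
            rw [cnt_append, mem_pvKeys_append, hmxv]
            simp [hkc]
        · rw [List.nodup_append]
          refine ⟨h5, by simp, ?_⟩
          intro a ha b hb
          have hb' : b = c := List.mem_singleton.mp hb
          have harg := ((h4 a).mp ha).2
          intro heq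
          rw [heq, hb'] at harg
          omega
      · have hmaxp : max (pvMx p) 0 = pvMx p := by
          rcases hmaxfacts with hc | hc
          · exact hc
          · omega
        have hlt : pvCnt p c + 1 < pvMx p := by omega
        have hmxv : pvMx (p ++ [c]) = pvMx p := by
          rcases max_choice (pvMx p) (pvCnt p c + 1) with hh | hh <;> omega
        rw [if_neg hgt, if_neg (by simp; omega)]
        refine ⟨?_, ?_, h5⟩
        · show max (pvMx p) 0 = max (pvMx (p ++ [c])) 0
          rw [hmxv]
        · intro k
          rw [h4 k]
          unfold pvArg
          by_cases hkc : k = c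
          · rw [hkc]
            constructor
            · rintro ⟨hm, hcnt⟩
              exfalso
              omega
            · rintro ⟨hm, hcnt⟩
              exfalso
              rw [cnt_append, hmxv] at hcnt
              omega
          · rw [cnt_append, mem_pvKeys_append, hmxv]
            simp [hkc]
  -- the award folds
  have hmconv : ksD.foldl pvDictBump mA
      = ksD.foldl (fun d k => d.insert k (d.getD k 0 + 1)) mA := by
    apply PySem.List.foldl_congr_mem
    intro acc x _
    exact pvDictBump_eq acc x
  have haward := bAward_fold BL.2 awards ans h10
  have hcnteq : ∀ k, ksD.count k = BL.2.count k := by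
    intro k
    by_cases hk : pvArg (p ++ [c]) k
    · rw [count_eq_one_of_nodup_mem hnodD ((hmemD k).mpr hk),
        count_eq_one_of_nodup_mem hbl.2.2 ((hbl.2.1 k).mpr hk)]
    · rw [List.count_eq_zero_of_not_mem (fun hm => hk ((hmemD k).mp hm)),
        List.count_eq_zero_of_not_mem (fun hm => hk ((hbl.2.1 k).mp hm))]
  -- assemble
  have hAstep : aStep (dA, mA) c = (PySem.Dict.counter (p ++ [c]), ksD.foldl pvDictBump mA) := by
    show (pvDictBump dA c,
      (PySem.Set.ofList ((pvDictBump dA c).items.foldl aScanStep (-1, [])).2 : List Int).foldl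
        pvDictBump mA) = _
    rw [hd]
  have hBstep : bStep (counts, best, leaders, awards, ans) c
      = (counts.insert c (counts.getD c 0 + 1), BL.1, BL.2,
         (BL.2.foldl bAward (awards, ans)).1, (BL.2.foldl bAward (awards, ans)).2) := rfl
  unfold pvInv
  rw [hAstep, hBstep]
  refine ⟨rfl, hcounts, hbl.1, hbl.2.1, hbl.2.2, ?_, ?_, ?_, ?_, ?_, ?_, ?_⟩
  · intro k
    rw [hmconv, haward]
    rw [PySem.Dict.getD_foldl_insert_add_one, PySem.Dict.getD_foldl_insert_add_one,
      h6 k, hcnteq k]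
  · intro k
    rw [hmconv, haward]
    rw [PySem.Dict.keys_foldl_insert, PySem.Dict.keys_foldl_insert]
    rw [mem_set_update, mem_set_update, h7 k, hmemD k, hbl.2.1 k]
  · rw [hmconv]
    exact PySem.Dict.nodup_keys_foldl_insert _ _ _ h8
  · rw [haward]
    exact PySem.Dict.nodup_keys_foldl_insert _ _ _ h9
  · rw [haward]
  · intro k
    rw [hmconv, PySem.Dict.getD_foldl_insert_add_one]
    have hh := h11 k
    have hc0 : (0 : Int) ≤ (ksD.count k : Int) := Int.natCast_nonneg _
    omega
  · intro _
    have hne : p ++ [c] ≠ [] := by simp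
    obtain ⟨k0, hk0, hk0c⟩ := Mx_attained hne
    have hk0D : k0 ∈ ksD := (hmemD k0).mpr ⟨hk0, hk0c⟩
    have hmem : k0 ∈ (ksD.foldl pvDictBump mA).keys := by
      rw [hmconv, PySem.Dict.keys_foldl_insert, mem_set_update]
      exact Or.inr hk0D
    exact List.ne_nil_of_mem hmem

lemma pvInv_fold (rest : List Int) : ∀ p stA stB, pvInv p stA stB →
    pvInv (p ++ rest) (rest.foldl aStep stA) (rest.foldl bStep stB) := by
  intro p stA stB h
  induction rest generalizing p stA stB with
  | nil => simpa using h
  | cons r t ih =>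
    have := ih (p ++ [r]) _ _ (pvInv_step p r stA stB h)
    simpa using this
  
lemma pvInv_nil : pvInv [] (PySem.Dict.empty, PySem.Dict.empty)
    (PySem.Dict.empty, 0, [], PySem.Dict.empty, 0) := by
  refine ⟨rfl, rfl, by decide, ?_, by simp, by simp, by simp, by decide, by decide, by decide,
    by simp, by simp⟩
  intro k
  simp [pvArg, pvKeys, PySem.Set.ofList]

-- ===== VERDICT (by name: the statement is the Claim_ definition above) =====
theorem getMaximumCategoryMaxCount_spec : Claim_equal_getMaximumCategoryMaxCount := by
  intro cats _ hpre
  unfold Spec_getMaximumCategoryMaxCount getMaximumCategoryMaxCount getMaximumCategoryMaxCount_alt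
  simp only []
  have hinv := pvInv_fold cats [] _ _ pvInv_nil
  simp only [List.nil_append] at hinv
  obtain ⟨h1, h2, h3, h4, h5, h6, h7, h8, h9, h10, h11, h12⟩ := hinv
  set stA := cats.foldl aStep (PySem.Dict.empty, PySem.Dict.empty) with hA
  set stB := cats.foldl bStep (PySem.Dict.empty, 0, [], PySem.Dict.empty, 0) with hB
  show (PySem.List.max? stA.2.values (fun x => x)).getD 0 = stB.2.2.2.2
  have hkeysne : stA.2.keys ≠ [] := h12 hpre
  obtain ⟨k0, kt, hkeq⟩ := List.exists_cons_of_ne_nil hkeysne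
  have hvals : stA.2.values = stA.2.keys.map (fun k => stA.2.getD k 0) :=
    PySem.Dict.values_eq_map_keys stA.2 h8 0
  rw [hvals, hkeq]
  simp only [List.map_cons, PySem.List.max?_id_cons, Option.getD_some]
  -- the running max of A's values equals pvVK of A's m
  have hpos : 0 ≤ stA.2.getD k0 0 := h11 k0
  have hVA : pvVK stA.2 = (kt.map (fun k => stA.2.getD k 0)).foldl max (stA.2.getD k0 0) := by
    unfold pvVK
    rw [hkeq]
    simp only [List.map_cons, List.foldl_cons]
    rw [max_eq_right hpos]
  rw [← hVA, pvVK_ext stA.2 stB.2.2.2.1 h7 h6, ← h10]
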